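-- pv_equiv track=rewrite | github.com/thaisdmariano/INDICE-SEQUENCIAL-DE-PALAVRAS | app_indices_sequenciais.py | processar_indices_para_teste
-- ===== SOURCE A (Python) =====
-- from typing import Dict
--
-- def processar_indices_para_teste(indices: Dict[str, str], texto_teste: str) -> Dict[str, str]:
--     """
--     Processa os índices para teste, mantendo a sequência e criando derivações baseadas no contexto
--     Args:
--         indices: Dicionário de índices sequenciais do treinamento
--         texto_teste: Texto para teste
--     Returns:
--         Dicionário com os índices processados para teste
--     """
--     # Divide o texto de teste em palavras
--     palavras_teste = texto_teste.split()
--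
--     # Cria o dicionário de índices para teste
--     indices_teste = {}
--
--     # Mantém um registro das palavras já vistas
--     palavras_vistas = {}
--
--     # Processa o texto de teste palavra por palavra
--     for i, palavra in enumerate(palavras_teste, 1):
--         # Cria o índice base
--         indice_base = f"0,{i}"
--
--         # Verifica se a palavra já foi vista
--         if palavra in palavras_vistas:
--             # Cria uma derivação baseada na ocorrência anterior
--             ultima_ocorrencia = palavras_vistas[palavra]
--             nova_ocorrencia = ultima_ocorrencia + 1
--             palavras_vistas[palavra] = nova_ocorrencia
--
--             # Cria o índice derivado
--             indice_derivado = f"0,{i}.{nova_ocorrencia}"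
--             indices_teste[indice_derivado] = palavra
--         else:
--             # Primeira ocorrência da palavra
--             palavras_vistas[palavra] = 1
--             indices_teste[indice_base] = palavra
--
--     return indices_teste
--
--     return indices_teste
-- ===== SOURCE B (Python) =====
-- def processar_indices_para_teste(indices, texto_teste):
--     """Staged passes: an inverted index word -> ordered positions, then a key table
--     per position derived from each word's occurrence list, then emission in position order."""
--     palavras = texto_teste.split()
--
--     # pass 1: inverted index, each word to the ordered list of its 1-based positions
--     posicoes = {}
--     for i, palavra in enumerate(palavras, 1):
--         posicoes.setdefault(palavra, []).append(i)
--
--     # pass 2: key table position -> index key (first occurrence bare, repeats .2, .3, ...)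
--     chaves = {}
--     for ps in posicoes.values():
--         chaves[ps[0]] = f"0,{ps[0]}"
--         for j, p in enumerate(ps[1:], 2):
--             chaves[p] = f"0,{p}.{j}"
--
--     # pass 3: emit in position order (every position has exactly one key)
--     return {chaves[i]: palavra for i, palavra in enumerate(palavras, 1)}
-- ===== Notes on version B (the rewrite author's own statement) =====
-- stated objective: alternative
-- what changed: Replaces A's single pass with a running seen-counter dict by three staged passes: build an inverted index word -> ordered position list, derive a key table position -> index key from each word's occurrence list, then emit the dict in position order.
import Mathlib
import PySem

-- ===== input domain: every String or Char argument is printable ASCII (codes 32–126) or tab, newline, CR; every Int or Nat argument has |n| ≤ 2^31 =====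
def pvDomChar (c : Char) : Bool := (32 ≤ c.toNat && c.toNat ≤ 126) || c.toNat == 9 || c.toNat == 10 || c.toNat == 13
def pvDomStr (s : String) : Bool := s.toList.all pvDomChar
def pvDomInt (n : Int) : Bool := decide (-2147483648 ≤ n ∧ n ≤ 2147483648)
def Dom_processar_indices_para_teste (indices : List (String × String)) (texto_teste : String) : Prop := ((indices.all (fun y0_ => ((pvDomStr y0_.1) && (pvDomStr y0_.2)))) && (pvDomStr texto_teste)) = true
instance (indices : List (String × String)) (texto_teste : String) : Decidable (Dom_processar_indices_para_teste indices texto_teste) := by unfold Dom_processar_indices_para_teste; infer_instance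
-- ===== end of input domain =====

-- B replaces A's single running-seen-counter pass by three staged passes: an inverted index
-- word -> ordered positions, a key table per position, then emission in position order
-- (objective: alternative decomposition, not faster).

-- ===== PORT A =====
-- one loop step of A: state = (indices_teste, palavras_vistas), p = (i, palavra);
-- Python's 'palavra in palavras_vistas' + lookup is ported as one get? (exact: contains ↔ get?.isSome)
def pvStepA (st : PySem.Dict String String × PySem.Dict String Int) (p : Int × String) :
    PySem.Dict String String × PySem.Dict String Int :=
  let indice_base := "0," ++ PySem.Int.toStr p.1
  match st.2.get? p.2 with
  | some ultima_ocorrencia =>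
      let nova_ocorrencia := ultima_ocorrencia + 1
      (st.1.insert ("0," ++ PySem.Int.toStr p.1 ++ "." ++ PySem.Int.toStr nova_ocorrencia) p.2,
       st.2.insert p.2 nova_ocorrencia)
  | none =>
      (st.1.insert indice_base p.2, st.2.insert p.2 (1 : Int))

def processar_indices_para_teste (indices : List (String × String)) (texto_teste : String) : List (String × String) :=
  let palavras_teste := PySem.Str.split₀ texto_teste
  ((PySem.List.enumerate palavras_teste 1).foldl pvStepA
      ((PySem.Dict.empty : PySem.Dict String String), (PySem.Dict.empty : PySem.Dict String Int))).1.items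

-- ===== PORT B =====
-- pass 1 step: posicoes.setdefault(palavra, []).append(i)  =  modify p.2 [] (· ++ [p.1])
def pvB1 (d : PySem.Dict String (List Int)) (p : Int × String) : PySem.Dict String (List Int) :=
  d.modify p.2 [] (fun l => l ++ [p.1])

-- pass 2 step, one positions list ps: chaves[ps[0]] bare, then chaves[p] = "0,{p}.{j}" for j,p in enumerate(ps[1:], 2)
-- (the [] branch is unreachable in Source B: every positions list holds at least one position)
def pvB2 (ch : PySem.Dict Int String) (ps : List Int) : PySem.Dict Int String :=
  match ps with
  | [] => ch
  | p0 :: rest =>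
      (PySem.List.enumerate rest 2).foldl
        (fun c q => c.insert q.2 ("0," ++ PySem.Int.toStr q.2 ++ "." ++ PySem.Int.toStr q.1))
        (ch.insert p0 ("0," ++ PySem.Int.toStr p0))

def processar_indices_para_teste_alt (indices : List (String × String)) (texto_teste : String) : List (String × String) :=
  let palavras := PySem.Str.split₀ texto_teste
  let posicoes := (PySem.List.enumerate palavras 1).foldl pvB1 (PySem.Dict.empty : PySem.Dict String (List Int))
  let chaves := posicoes.values.foldl pvB2 (PySem.Dict.empty : PySem.Dict Int String)
  -- chaves[i] never raises (every position 1..n has a key); ported as get? + getD ""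
  (PySem.Dict.ofList ((PySem.List.enumerate palavras 1).map
      (fun q => ((chaves.get? q.1).getD "", q.2)))).items

-- ===== PRECONDITION & SPEC =====
def Spec_processar_indices_para_teste (indices : List (String × String)) (texto_teste : String) (out : List (String × String)) : Prop := out = processar_indices_para_teste_alt indices texto_teste
instance (indices : List (String × String)) (texto_teste : String) (out : List (String × String)) : Decidable (Spec_processar_indices_para_teste indices texto_teste out) := by unfold Spec_processar_indices_para_teste; infer_instance

-- ===== CLAIM (what is proved, stated in full; the proofs are below) =====
def Claim_equal_processar_indices_para_teste : Prop := ∀ (indices : List (String × String)) (texto_teste : String), Dom_processar_indices_para_teste indices texto_teste → Spec_processar_indices_para_teste indices texto_teste (processar_indices_para_teste indices texto_teste)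

-- ===== LEMMAS AND PROOFS =====

-- the key both programs attach to position i carrying occurrence number c
def pvKey (i c : Int) : String :=
  if c = 1 then "0," ++ PySem.Int.toStr i
  else "0," ++ PySem.Int.toStr i ++ "." ++ PySem.Int.toStr c

-- the (key, word) pair for position q.1 holding word q.2, by prefix occurrence count
def pvPairB (ws : List String) (q : Int × String) : String × String :=
  (pvKey q.1 (((PySem.List.slice ws none (some q.1)).count q.2 : Nat) : Int), q.2)

-- ordered list of 1-based positions of w in ws
def pvPos (ws : List String) (w : String) : List Int :=
  ((PySem.List.enumerate ws 1).filter (fun q => q.2 == w)).map Prod.fst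

-- ---------- A-side: A's dict is ofList of the prefix-count keyed pairs ----------

-- invariant: palavras_vistas stores exactly the positive prefix occurrence counts
def pvInv (pre : List String) (vis : PySem.Dict String Int) : Prop :=
  ∀ w, vis.get? w = if pre.count w = 0 then none else some ((pre.count w : Nat) : Int)

lemma pvInv_step (pre : List String) (w : String) (vis : PySem.Dict String Int)
    (h : pvInv pre vis) :
    pvInv (pre ++ [w]) (vis.insert w ((pre.count w : Nat) + 1 : Int)) := by
  intro x
  by_cases hx : x = w
  · subst hx
    rw [PySem.Dict.get?_insert_self]
    simp [List.count_append]
  · rw [PySem.Dict.get?_insert_of_ne _ _ hx, h x]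
    have hwx : ¬ w = x := fun e => hx e.symm
    simp [List.count_append, hwx]

lemma pvMain (ws pre : List String) (out : PySem.Dict String String)
    (vis : PySem.Dict String Int) (h : pvInv pre vis) :
    ((PySem.List.enumerate ws ((pre.length : Int) + 1)).foldl pvStepA (out, vis)).1
      = ((PySem.List.enumerate ws ((pre.length : Int) + 1)).map (pvPairB (pre ++ ws))).foldl
          (fun d p => d.insert p.1 p.2) out := by
  induction ws generalizing pre out vis with
  | nil => simp [PySem.List.enumerate_nil]
  | cons w ws ih =>
    rw [PySem.List.enumerate_cons, List.foldl_cons, List.map_cons, List.foldl_cons]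
    have hstep : pvStepA (out, vis) ((pre.length : Int) + 1, w)
        = (out.insert (pvPairB (pre ++ w :: ws) ((pre.length : Int) + 1, w)).1 w,
           vis.insert w (((pre.count w : Nat) : Int) + 1)) := by
      have hcast : ((pre.length : Int) + 1) = ((pre.length + 1 : Nat) : Int) := by push_cast; ring
      have htake : (pre ++ w :: ws).take (pre.length + 1) = pre ++ [w] := by
        simp [List.take_append, List.take_succ_cons]
      have hcnt : (pre ++ [w]).count w = pre.count w + 1 := by simp
      unfold pvStepA pvPairB pvKey
      rw [h w]
      by_cases h0 : pre.count w = 0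
      · rw [if_pos h0]
        simp only [hcast, PySem.List.slice_to_natCast, htake, hcnt, h0]
        norm_num
      · rw [if_neg h0]
        simp only [hcast, PySem.List.slice_to_natCast, htake, hcnt]
        rw [if_neg (by push_cast; omega)]
        push_cast
        rfl
    rw [hstep]
    have happ : pre ++ w :: ws = (pre ++ [w]) ++ ws := by simp
    have hlen : (pre.length : Int) + 1 + 1 = (((pre ++ [w]).length : Int) + 1) := by
      push_cast [List.length_append, List.length_singleton]; ring
    rw [happ, hlen]
    exact ih (pre ++ [w]) _ _ (pvInv_step pre w vis h)

lemma pvInv_empty : pvInv [] PySem.Dict.empty := by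
  intro w; simp [PySem.Dict.get?, PySem.Dict.empty]

-- ---------- B-side lemmas ----------

lemma pvPosicoes_getD (ws : List String) (w : String) :
    ((PySem.List.enumerate ws 1).foldl pvB1
        (PySem.Dict.empty : PySem.Dict String (List Int))).getD w [] = pvPos ws w := by
  have h := PySem.Dict.getD_foldl_modify_append
      ((PySem.List.enumerate ws 1).map Prod.swap)
      (PySem.Dict.empty : PySem.Dict String (List Int)) w
  rw [List.foldl_map] at h
  simp only [Prod.fst_swap, Prod.snd_swap] at h
  unfold pvB1
  rw [h]
  simp [pvPos, List.filter_map, Function.comp_def, List.map_map, PySem.Dict.getD_empty]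

lemma pvPosicoes_values (ws : List String) :
    ((PySem.List.enumerate ws 1).foldl pvB1
        (PySem.Dict.empty : PySem.Dict String (List Int))).values
      = (PySem.Set.ofList ws).map (fun w => pvPos ws w) := by
  have hnd : ((PySem.List.enumerate ws 1).foldl pvB1
      (PySem.Dict.empty : PySem.Dict String (List Int))).keys.Nodup := by
    have := PySem.Dict.nodup_keys_foldl_modify_key (PySem.List.enumerate ws 1)
      (fun p => p.2) ([] : List Int) (fun _ p l => l ++ [p.1])
      (PySem.Dict.empty : PySem.Dict String (List Int)) (by simp)
    exact this
  have hkeys : ((PySem.List.enumerate ws 1).foldl pvB1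
      (PySem.Dict.empty : PySem.Dict String (List Int))).keys = PySem.Set.ofList ws := by
    have := PySem.Dict.keys_foldl_modify_key (PySem.List.enumerate ws 1)
      (fun p => p.2) ([] : List Int) (fun _ p l => l ++ [p.1])
      (PySem.Dict.empty : PySem.Dict String (List Int))
    simpa [PySem.List.map_snd_enumerate, PySem.Set.update_nil_left, PySem.Dict.keys_empty] using this
  have := PySem.Dict.values_eq_map_keys _ (by rw [hkeys] at hnd ⊢; exact hnd) ([] : List Int)
  rw [this, hkeys]
  congr 1
  funext w
  exact pvPosicoes_getD ws w

lemma pvMem_pvPos (ws : List String) (w : String) (i : Int) :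
    i ∈ pvPos ws w ↔ ∃ (k : Nat) (h : k < ws.length), i = (k : Int) + 1 ∧ ws[k] = w := by
  simp only [pvPos, List.mem_map, List.mem_filter, PySem.List.mem_enumerate_iff]
  constructor
  · rintro ⟨q, ⟨⟨k, hk, rfl⟩, hw⟩, rfl⟩
    exact ⟨k, hk, by omega, by simpa using hw⟩
  · rintro ⟨k, hk, rfl, hw⟩
    exact ⟨(1 + (k : Int), ws[k]), ⟨⟨k, hk, rfl⟩, by simpa using hw⟩, by omega⟩

lemma pvNodup_pvPos (ws : List String) (w : String) : (pvPos ws w).Nodup := by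
  have h := PySem.List.pairwise_lt_enumerate ws (1 : Int)
  have h2 : (pvPos ws w).Nodup := by
    unfold pvPos
    exact List.Pairwise.imp (fun hlt => ne_of_lt hlt)
      (List.pairwise_map.mpr (h.filter (fun q => q.2 == w)))
  exact h2

lemma pvLength_pvPos (ws : List String) (w : String) : (pvPos ws w).length = ws.count w := by
  have key : ∀ (l : List String) (s : Int),
      ((PySem.List.enumerate l s).countP (fun q => q.2 == w)) = l.countP (· == w) := by
    intro l
    induction l with
    | nil => intro s; simp [PySem.List.enumerate_nil]
    | cons x xs ih =>
      intro s
      rw [PySem.List.enumerate_cons, List.countP_cons, List.countP_cons, ih]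
  simp only [pvPos, List.length_map, ← List.countP_eq_length_filter]
  rw [key, List.count]

lemma pvPos_decomp (ws : List String) (k : Nat) (hk : k < ws.length) :
    ∃ T, pvPos ws ws[k] = pvPos (ws.take k) ws[k] ++ ((k : Int) + 1) :: T := by
  have hsplit : ws = ws.take k ++ ws[k] :: ws.drop (k + 1) := by
    conv_lhs => rw [← List.take_append_drop k ws]
    rw [List.drop_eq_getElem_cons hk]
  refine ⟨((PySem.List.enumerate (ws.drop (k + 1)) ((k : Int) + 2)).filter
      (fun q => q.2 == ws[k])).map Prod.fst, ?_⟩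
  conv_lhs => rw [show pvPos ws ws[k] = pvPos (ws.take k ++ ws[k] :: ws.drop (k + 1)) ws[k] by rw [← hsplit]]
  unfold pvPos
  rw [PySem.List.enumerate_append, PySem.List.enumerate_cons, List.filter_append, List.map_append]
  have hlen : (List.take k ws).length = k := by simp [Nat.min_eq_left (Nat.le_of_lt hk)]
  simp only [hlen, List.filter_cons, beq_self_eq_true, if_pos, List.map_cons]
  have e1 : (1 : Int) + (k : Int) = (k : Int) + 1 := by ring
  have e2 : (k : Int) + 1 + 1 = (k : Int) + 2 := by ring
  rw [e1, e2]

lemma pvFold_get?_not_mem (l : List Int) (s : Int) (ch : PySem.Dict Int String)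
    (g : Int → Int → String) (i : Int) (hi : i ∉ l) :
    ((PySem.List.enumerate l s).foldl (fun c q => c.insert q.2 (g q.1 q.2)) ch).get? i
      = ch.get? i := by
  induction l generalizing s ch with
  | nil => simp [PySem.List.enumerate_nil]
  | cons x xs ih =>
    rw [PySem.List.enumerate_cons, List.foldl_cons]
    rw [ih (s + 1) _ (fun h => hi (List.mem_cons_of_mem x h))]
    exact PySem.Dict.get?_insert_of_ne _ _ (fun h => hi (h ▸ List.mem_cons_self))

lemma pvFold_get?_mem (l : List Int) (s : Int) (ch : PySem.Dict Int String)
    (g : Int → Int → String) (i : Int) (hnd : l.Nodup) (hi : i ∈ l) :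
    ((PySem.List.enumerate l s).foldl (fun c q => c.insert q.2 (g q.1 q.2)) ch).get? i
      = some (g (s + (l.idxOf i : Nat)) i) := by
  induction l generalizing s ch with
  | nil => cases hi
  | cons x xs ih =>
    rw [PySem.List.enumerate_cons, List.foldl_cons]
    by_cases hx : i = x
    · subst hx
      have hnx : i ∉ xs := (List.nodup_cons.mp hnd).1
      rw [pvFold_get?_not_mem xs (s + 1) _ g i hnx, PySem.Dict.get?_insert_self]
      simp [List.idxOf_cons_self]
    · have hin : i ∈ xs := (List.mem_cons.mp hi).resolve_left hx
      rw [ih (s + 1) _ (List.nodup_cons.mp hnd).2 hin]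
      have : ((x :: xs).idxOf i : Int) = (xs.idxOf i : Int) + 1 := by
        rw [List.idxOf_cons_ne _ (fun h => hx h.symm)]; push_cast; ring
      rw [this]
      congr 2
      ring

lemma pvB2_get?_not_mem (ch : PySem.Dict Int String) (l : List Int) (i : Int) (hi : i ∉ l) :
    (pvB2 ch l).get? i = ch.get? i := by
  cases l with
  | nil => rfl
  | cons p0 rest =>
    show PySem.Dict.get? ((PySem.List.enumerate rest 2).foldl (fun c q => c.insert q.2 ("0," ++ PySem.Int.toStr q.2 ++ "." ++ PySem.Int.toStr q.1)) (ch.insert p0 ("0," ++ PySem.Int.toStr p0))) i = ch.get? i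
    rw [pvFold_get?_not_mem rest 2 (ch.insert p0 ("0," ++ PySem.Int.toStr p0)) (fun j p => "0," ++ PySem.Int.toStr p ++ "." ++ PySem.Int.toStr j) i (fun h => hi (List.mem_cons_of_mem p0 h))]
    exact PySem.Dict.get?_insert_of_ne _ _ (fun h => hi (h ▸ List.mem_cons_self))

lemma pvB2_get?_mem (ch : PySem.Dict Int String) (l : List Int) (i : Int)
    (hnd : l.Nodup) (hi : i ∈ l) :
    (pvB2 ch l).get? i = some (pvKey i ((l.idxOf i : Nat) + 1)) := by
  cases l with
  | nil => cases hi
  | cons p0 rest =>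
    show ((PySem.List.enumerate rest 2).foldl (fun c q => c.insert q.2 ("0," ++ PySem.Int.toStr q.2 ++ "." ++ PySem.Int.toStr q.1)) (ch.insert p0 ("0," ++ PySem.Int.toStr p0))).get? i = _
    by_cases hx : i = p0
    · subst hx
      have hnx : i ∉ rest := (List.nodup_cons.mp hnd).1
      rw [pvFold_get?_not_mem rest 2 (ch.insert i ("0," ++ PySem.Int.toStr i)) (fun j p => "0," ++ PySem.Int.toStr p ++ "." ++ PySem.Int.toStr j) i hnx, PySem.Dict.get?_insert_self]
      simp [pvKey, List.idxOf_cons_self]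
    · have hin : i ∈ rest := (List.mem_cons.mp hi).resolve_left hx
      rw [pvFold_get?_mem rest 2 (ch.insert p0 ("0," ++ PySem.Int.toStr p0)) (fun j p => "0," ++ PySem.Int.toStr p ++ "." ++ PySem.Int.toStr j) i (List.nodup_cons.mp hnd).2 hin]
      have hidx : ((p0 :: rest).idxOf i : Nat) = (rest.idxOf i : Nat) + 1 := by
        rw [List.idxOf_cons_ne _ (fun h => hx h.symm)]
      rw [hidx]
      unfold pvKey
      rw [if_neg (by push_cast; omega)]
      have harg : (2 : Int) + ((rest.idxOf i : Nat) : Int) = (((rest.idxOf i + 1 : Nat) : Int) + 1) := by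
        push_cast; ring
      rw [harg]

lemma pvFoldB2_pres (ws : List String) (es : List String) (ch : PySem.Dict Int String) (i : Int)
    (h : ∀ w' ∈ es, i ∉ pvPos ws w') :
    (es.foldl (fun ch w => pvB2 ch (pvPos ws w)) ch).get? i = ch.get? i := by
  induction es generalizing ch with
  | nil => rfl
  | cons e es ih =>
    rw [List.foldl_cons, ih _ (fun w' hw' => h w' (List.mem_cons_of_mem e hw'))]
    exact pvB2_get?_not_mem ch (pvPos ws e) i (h e List.mem_cons_self)

lemma pvChaves_get? (ws : List String) (k : Nat) (hk : k < ws.length) :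
    (((PySem.Set.ofList ws).map (fun w => pvPos ws w)).foldl pvB2
        (PySem.Dict.empty : PySem.Dict Int String)).get? ((k : Int) + 1)
      = some (pvKey ((k : Int) + 1) (((ws.take (k + 1)).count ws[k] : Nat) : Int)) := by
  set w := ws[k] with hw
  -- position k+1 belongs to w's list and to no other word's list
  have hiw : ((k : Int) + 1) ∈ pvPos ws w :=
    (pvMem_pvPos ws w _).mpr ⟨k, hk, rfl, rfl⟩
  have honly : ∀ w', w' ≠ w → ((k : Int) + 1) ∉ pvPos ws w' := by
    intro w' hne hmem
    obtain ⟨k', hk', he, hg⟩ := (pvMem_pvPos ws w' _).mp hmem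
    have hkk : k' = k := by omega
    subst hkk
    rw [hw] at hne
    exact hne hg.symm
  -- split the distinct-word list at w
  have hwmem : w ∈ PySem.Set.ofList ws :=
    (PySem.Set.mem_ofList _ _).mpr (List.getElem_mem hk)
  obtain ⟨s1, s2, hsplit⟩ := List.append_of_mem hwmem
  have hnodups : (PySem.Set.ofList ws).Nodup := PySem.Set.nodup_ofList ws
  have hw2 : w ∉ s2 := by
    rw [hsplit] at hnodups
    exact (List.nodup_cons.mp hnodups.of_append_right).1
  rw [hsplit, List.map_append, List.map_cons, List.foldl_append, List.foldl_cons, List.foldl_map]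
  rw [pvFoldB2_pres ws s2 _ _ (fun w' hw' => honly w' (fun he => hw2 (he ▸ hw')))]
  rw [pvB2_get?_mem _ _ _ (pvNodup_pvPos ws w) hiw]
  -- idxOf of position k+1 in w's list = count of w in ws.take k
  obtain ⟨T, hT⟩ := pvPos_decomp ws k hk
  rw [← hw] at hT
  have hnd := pvNodup_pvPos ws w
  rw [hT] at hnd
  have hnotmem : ((k : Int) + 1) ∉ pvPos (ws.take k) w := by
    intro hmem
    exact (List.disjoint_of_nodup_append hnd) hmem List.mem_cons_self
  have hidx : (pvPos ws w).idxOf ((k : Int) + 1) = (pvPos (ws.take k) w).length := by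
    rw [hT, List.idxOf_append_of_notMem hnotmem, List.idxOf_cons_self]
    omega
  have hcnt : (ws.take (k + 1)).count w = (ws.take k).count w + 1 := by
    rw [List.take_add_one, List.getElem?_eq_getElem hk]
    rw [Option.toList_some, List.count_append, ← hw]
    simp
  rw [hidx, pvLength_pvPos, hcnt]
  have : (((ws.take k).count w : Nat) : Int) + 1 = (((ws.take k).count w + 1 : Nat) : Int) := by
    push_cast; ring
  rw [this]

-- ===== VERDICT (by name: the statement is the Claim_ definition above) =====
theorem processar_indices_para_teste_spec : Claim_equal_processar_indices_para_teste := by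
  intro indices texto _
  unfold Spec_processar_indices_para_teste
  have hA := pvMain (PySem.Str.split₀ texto) [] PySem.Dict.empty PySem.Dict.empty pvInv_empty
  simp only [List.length_nil, Int.natCast_zero, zero_add, List.nil_append] at hA
  simp only [processar_indices_para_teste, processar_indices_para_teste_alt]
  rw [hA, pvPosicoes_values (PySem.Str.split₀ texto)]
  set ws := PySem.Str.split₀ texto with hws
  have hmap : (PySem.List.enumerate ws 1).map
      (fun q => (((((PySem.Set.ofList ws).map (fun w => pvPos ws w)).foldl pvB2
          (PySem.Dict.empty : PySem.Dict Int String)).get? q.1).getD "", q.2))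
      = (PySem.List.enumerate ws 1).map (pvPairB ws) := by
    apply List.map_congr_left
    intro q hq
    obtain ⟨k, hk, rfl⟩ := (PySem.List.mem_enumerate_iff ws 1 q).mp hq
    have h1 : (1 : Int) + (k : Int) = (k : Int) + 1 := by ring
    simp only [h1]
    rw [pvChaves_get? ws k hk]
    unfold pvPairB
    have h2 : ((k : Int) + 1) = ((k + 1 : Nat) : Int) := by push_cast; ring
    simp only [Option.getD_some, h2, PySem.List.slice_to_natCast]
  rw [hmap]
  rfl
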